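-- pv_equiv track=rewrite | github.com/allaspectsdev/BioForge | src/bioforge/modules/assembly/core/golden_gate/domestication.py | _codons_overlapping_site
-- ===== SOURCE A (Python) =====
-- def _codons_overlapping_site(
--     site_start: int,
--     site_len: int,
--     cds_start: int,
--     seq_len: int,
-- ) -> list[int]:
--     """Find which codon positions (in-frame relative to cds_start) overlap a site.
--
--     Returns a list of codon start positions (0-based in the sequence) that
--     overlap with the recognition site.
--     """
--     site_end = site_start + site_len
--     codon_positions = []
--
--     # Walk codons from cds_start
--     pos = cds_start
--     while pos + 3 <= seq_len:
--         codon_end = pos + 3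
--         # Check if this codon overlaps the site
--         if pos < site_end and codon_end > site_start:
--             codon_positions.append(pos)
--         if pos >= site_end:
--             break
--         pos += 3
--
--     return codon_positions
-- ===== SOURCE B (Python) =====
-- def _codons_overlapping_site(
--     site_start: int,
--     site_len: int,
--     cds_start: int,
--     seq_len: int,
-- ) -> list[int]:
--     """Arithmetic version: compute the overlapping in-frame codon range directly."""
--     site_end = site_start + site_len
--     # first in-frame codon start > site_start - 3 (ceil division), not before cds_start
--     k0 = max(0, -((cds_start + 2 - site_start) // 3))
--     lo = cds_start + 3 * k0
--     hi = min(site_end - 1, seq_len - 3)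
--     return list(range(lo, hi + 1, 3))
-- ===== Notes on version B (the rewrite author's own statement) =====
-- stated objective: faster
-- what changed: Replaces A's codon-by-codon walk from cds_start up to the site with a closed-form computation of the first and last overlapping in-frame codon, emitting only the overlapping codons via range().
import Mathlib
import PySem

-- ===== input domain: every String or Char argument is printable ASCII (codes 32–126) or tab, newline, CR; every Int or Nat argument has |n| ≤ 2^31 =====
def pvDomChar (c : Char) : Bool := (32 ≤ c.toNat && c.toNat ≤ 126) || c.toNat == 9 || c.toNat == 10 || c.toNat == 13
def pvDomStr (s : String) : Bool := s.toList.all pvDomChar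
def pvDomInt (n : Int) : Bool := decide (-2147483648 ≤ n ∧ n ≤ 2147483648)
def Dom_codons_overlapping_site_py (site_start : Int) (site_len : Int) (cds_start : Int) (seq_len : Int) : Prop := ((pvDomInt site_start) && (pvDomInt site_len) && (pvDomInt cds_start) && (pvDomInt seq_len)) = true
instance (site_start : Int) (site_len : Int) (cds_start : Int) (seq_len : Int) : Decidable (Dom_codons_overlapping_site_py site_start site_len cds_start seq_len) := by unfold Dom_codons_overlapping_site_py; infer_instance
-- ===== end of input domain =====

-- B replaces A's codon-by-codon walk from cds_start by a closed-form computation of the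
-- first and last overlapping in-frame codon, emitting only those (objective: faster).

-- ===== PORT A =====
-- the while-loop of A: walks codons from `pos`, appending overlapping ones, with A's break
def pvLoopA (site_start : Int) (site_end : Int) (seq_len : Int) (pos : Int) (acc : List Int) : List Int :=
  if _h : pos + 3 ≤ seq_len then
    let acc' := if pos < site_end ∧ pos + 3 > site_start then acc ++ [pos] else acc
    if _h2 : site_end ≤ pos then acc'
    else pvLoopA site_start site_end seq_len (pos + 3) acc'
  else acc
termination_by (site_end - pos).toNat
decreasing_by omega

def codons_overlapping_site_py (site_start : Int) (site_len : Int) (cds_start : Int) (seq_len : Int) : List Int :=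
  let site_end := site_start + site_len
  pvLoopA site_start site_end seq_len cds_start []

-- ===== PORT B =====
def codons_overlapping_site_py_alt (site_start : Int) (site_len : Int) (cds_start : Int) (seq_len : Int) : List Int :=
  let site_end := site_start + site_len
  let k0 := max 0 (-(PySem.Int.floordiv (cds_start + 2 - site_start) 3))
  let lo := cds_start + 3 * k0
  let hi := min (site_end - 1) (seq_len - 3)
  PySem.List.pyRange lo (hi + 1) 3

-- ===== PRECONDITION & SPEC =====
def Spec_codons_overlapping_site_py (site_start : Int) (site_len : Int) (cds_start : Int) (seq_len : Int) (out : List Int) : Prop := out = codons_overlapping_site_py_alt site_start site_len cds_start seq_len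
instance (site_start : Int) (site_len : Int) (cds_start : Int) (seq_len : Int) (out : List Int) : Decidable (Spec_codons_overlapping_site_py site_start site_len cds_start seq_len out) := by unfold Spec_codons_overlapping_site_py; infer_instance

-- ===== CLAIM (what is proved, stated in full; the proofs are below) =====
def Claim_equal_codons_overlapping_site_py : Prop := ∀ (site_start : Int) (site_len : Int) (cds_start : Int) (seq_len : Int), Dom_codons_overlapping_site_py site_start site_len cds_start seq_len → Spec_codons_overlapping_site_py site_start site_len cds_start seq_len (codons_overlapping_site_py site_start site_len cds_start seq_len)

-- ===== LEMMAS AND PROOFS =====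

-- first in-frame codon start (≥ pos) that ends strictly after site_start
def pvLo (site_start : Int) (pos : Int) : Int :=
  pos + 3 * max 0 (-(PySem.Int.floordiv (pos + 2 - site_start) 3))

lemma pvLo_ge (ss pos : Int) : pos ≤ pvLo ss pos := by
  unfold pvLo
  have : (0 : Int) ≤ max 0 (-(PySem.Int.floordiv (pos + 2 - ss) 3)) := le_max_left _ _
  omega

lemma pvLo_eq_self (ss pos : Int) (h : ss < pos + 3) : pvLo ss pos = pos := by
  unfold pvLo
  rw [PySem.Int.floordiv_eq_ediv_of_pos (by norm_num)]
  omega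

lemma pvLo_step (ss pos : Int) (h : pos + 3 ≤ ss) : pvLo ss pos = pvLo ss (pos + 3) := by
  unfold pvLo
  rw [PySem.Int.floordiv_eq_ediv_of_pos (by norm_num),
      PySem.Int.floordiv_eq_ediv_of_pos (by norm_num)]
  omega

lemma pyRange3_nil (a b : Int) (h : b ≤ a) : PySem.List.pyRange a b 3 = [] := by
  rw [PySem.List.pyRange_of_pos a b (by norm_num)]
  simp [show ¬ a < b by omega]

lemma pyRange3_cons (a b : Int) (h : a < b) :
    PySem.List.pyRange a b 3 = a :: PySem.List.pyRange (a + 3) b 3 := by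
  rw [PySem.List.pyRange_of_pos a b (by norm_num),
      PySem.List.pyRange_of_pos (a + 3) b (by norm_num)]
  have hn : ((b - a + 3 - 1) / 3).toNat
      = (if a + 3 < b then ((b - (a + 3) + 3 - 1) / 3).toNat else 0) + 1 := by
    split_ifs with h3 <;> omega
  rw [if_pos h, hn, List.range_succ_eq_map]
  simp [List.map_map, Function.comp]
  intro k _
  ring

lemma pvLoopA_eq (ss se L : Int) : ∀ (n : Nat) (pos : Int) (acc : List Int),
    (se - pos).toNat ≤ n →
    pvLoopA ss se L pos acc
      = acc ++ PySem.List.pyRange (pvLo ss pos) (min (se - 1) (L - 3) + 1) 3 := by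
  intro n
  induction n with
  | zero =>
    intro pos acc h
    unfold pvLoopA
    have hse : se ≤ pos := by omega
    have hlo := pvLo_ge ss pos
    rw [pyRange3_nil _ _ (by omega)]
    split_ifs with h1 h2 <;> simp_all <;> omega
  | succ n ih =>
    intro pos acc h
    unfold pvLoopA
    by_cases h1 : pos + 3 ≤ L
    · by_cases h2 : se ≤ pos
      · -- break branch, and the overlap test is false (pos < se fails)
        have hlo := pvLo_ge ss pos
        rw [pyRange3_nil _ _ (by omega)]
        simp [h1, h2, show ¬ (pos < se ∧ ss < pos + 3) by omega]
      · by_cases h3 : ss < pos + 3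
        · -- codon overlaps: emit pos, continue
          rw [pyRange3_cons _ _ (by have := pvLo_eq_self ss pos h3; omega)]
          have hlo3 : pvLo ss (pos + 3) = pos + 3 := pvLo_eq_self ss (pos + 3) (by omega)
          simp only [h1, dif_pos, h2, dif_neg, not_false_iff,
            if_pos (show pos < se ∧ ss < pos + 3 from ⟨by omega, h3⟩)]
          rw [ih (pos + 3) (acc ++ [pos]) (by omega), hlo3, pvLo_eq_self ss pos h3]
          simp
        · -- codon entirely before the site: skip, continue
          simp only [h1, dif_pos, h2, dif_neg, not_false_iff,
            if_neg (show ¬ (pos < se ∧ ss < pos + 3) by omega)]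
          rw [ih (pos + 3) acc (by omega), pvLo_step ss pos (by omega)]
    · -- loop never entered / ends: sequence too short for another codon
      have hlo := pvLo_ge ss pos
      rw [pyRange3_nil _ _ (by omega)]
      simp [h1]

-- ===== VERDICT (by name: the statement is the Claim_ definition above) =====
theorem codons_overlapping_site_py_spec : Claim_equal_codons_overlapping_site_py := by
  intro ss sl cs L _
  unfold Spec_codons_overlapping_site_py codons_overlapping_site_py codons_overlapping_site_py_alt
  rw [pvLoopA_eq ss (ss + sl) L (ss + sl - cs).toNat cs [] (by omega)]
  rfl
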